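-- pv_equiv track=rewrite | github.com/homveloper/CoTe | 024_해시_신고결과받기/solution.py | solution
-- ===== SOURCE A (Python) =====
-- from collections import defaultdict
--
-- def solution(id_list, report, k):
--
--     # report를 기준으로   신고한 유저, 신고 받은 유저 리스트를 기록
--     reporters = defaultdict(set)
--     reportees = defaultdict(set)
--
--     for event in report:
--         reporter, reportee = event.split(" ")
--
--         reporters[reporter].add(reportee)
--         reportees[reportee].add(reporter)
--
--     # 정지 대상자 확인
--     blocks = set()
--
--     for reportee, users in reportees.items():
--         if len(users) >= k:
--             blocks.add(reportee)
--
--     # id_list를 순회하면서  신고자의 대상자 리스트 중 속하면 카운팅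
--     result = []
--     for id in id_list:
--         # 교집합으로 카운팅
--         count = len(blocks & reporters[id])
--         result.append(count)
--
--     return result
-- ===== SOURCE B (Python) =====
-- def solution(id_list, report, k):
--     # Brute force: no dicts/sets. Ordered list of distinct (reporter, reportee) pairs,
--     # then direct nested scans over it.
--     uniq = []
--     for event in report:
--         reporter, reportee = event.split(" ")
--         if (reporter, reportee) not in uniq:
--             uniq.append((reporter, reportee))
--
--     def blocked(user):
--         # user is suspended iff >= k distinct users reported them
--         return sum(1 for p in uniq if p[1] == user) >= k
--
--     return [sum(1 for p in uniq if p[0] == uid and blocked(p[1])) for uid in id_list]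
-- ===== Notes on version B (the rewrite author's own statement) =====
-- stated objective: alternative
-- what changed: B drops A's dict-of-set indexes, precomputed blocked set and per-id set intersection entirely: it dedupes reports into an ordered list of (reporter, reportee) pairs and answers each id by direct nested scans of that list (counting pairs whose reporter is the id and whose reportee is reported by >= k distinct users, the latter recomputed by a scan), trading hash indexing for brute force.
import Mathlib
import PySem

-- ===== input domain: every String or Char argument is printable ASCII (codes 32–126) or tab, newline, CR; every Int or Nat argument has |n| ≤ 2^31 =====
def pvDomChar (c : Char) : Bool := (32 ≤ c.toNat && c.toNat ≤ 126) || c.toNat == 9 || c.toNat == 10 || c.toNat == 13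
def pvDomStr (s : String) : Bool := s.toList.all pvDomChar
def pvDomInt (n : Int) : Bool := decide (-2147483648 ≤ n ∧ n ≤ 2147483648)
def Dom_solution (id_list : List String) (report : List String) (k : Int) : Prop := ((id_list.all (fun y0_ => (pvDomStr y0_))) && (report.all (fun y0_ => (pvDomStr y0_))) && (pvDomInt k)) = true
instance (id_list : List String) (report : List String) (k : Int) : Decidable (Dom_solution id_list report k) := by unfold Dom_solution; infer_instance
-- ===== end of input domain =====

-- B replaces A's dict-of-set indexes, precomputed blocked set and per-id set intersection by
-- brute-force nested scans over the ordered list of distinct (reporter, reportee) pairs;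
-- equal return value wherever A returns.

-- ===== PORT A =====
-- the two defaultdict(set)s of A, built in one loop over report (a pair state, as in the Python)
def solution_dicts (report : List String) :
    PySem.Dict String (PySem.Set String) × PySem.Dict String (PySem.Set String) :=
  report.foldl (fun st e =>
    match PySem.Str.split? e " " with
    | some [reporter, reportee] =>
        (st.1.insert reporter (PySem.Set.add (st.1.getD reporter []) reportee),
         st.2.insert reportee (PySem.Set.add (st.2.getD reportee []) reporter))
    | _ => st)   -- Python raises ValueError here (tuple unpacking); excluded by Pre_solution
    (PySem.Dict.empty, PySem.Dict.empty)

def solution (id_list : List String) (report : List String) (k : Int) : List Int :=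
  let st := solution_dicts report
  let reporters := st.1
  let reportees := st.2
  let blocks : PySem.Set String :=
    reportees.items.foldl (fun bl p => if k ≤ (p.2.length : Int) then PySem.Set.add bl p.1 else bl) []
  id_list.foldl (fun result id =>
    result ++ [((PySem.Set.inter blocks (reporters.getD id [])).length : Int)]) []

-- ===== PORT B =====
-- B's ordered list of distinct (reporter, reportee) pairs (the explicit 'not in' + append of Source B)
def solution_alt_uniq (report : List String) : List (String × String) :=
  report.foldl (fun u e =>
    match PySem.Str.split? e " " with
    | some [reporter, reportee] =>
        if (reporter, reportee) ∈ u then u else u ++ [(reporter, reportee)]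
    | _ => u)   -- Python raises ValueError here (tuple unpacking); excluded by Pre_solution
    []

-- B's 'blocked(user)': scan uniq, count pairs reporting the user, compare with k
def solution_alt_blocked (uniq : List (String × String)) (k : Int) (user : String) : Bool :=
  k ≤ (((uniq.filter (fun p => p.2 == user)).length : Int))

def solution_alt (id_list : List String) (report : List String) (k : Int) : List Int :=
  let uniq := solution_alt_uniq report
  id_list.map (fun uid =>
    (((uniq.filter (fun p => p.1 == uid && solution_alt_blocked uniq k p.2)).length : Int)))

-- ===== PRECONDITION & SPEC =====
-- Pre_ excludes exactly the report entries that do not split on " " into two fields: there the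
-- Python A raises ValueError at the tuple unpacking (and B raises in the same way).
def Pre_solution (id_list : List String) (report : List String) (k : Int) : Prop :=
  ∀ e ∈ report, ((PySem.Str.split? e " ").getD []).length = 2
instance (id_list : List String) (report : List String) (k : Int) : Decidable (Pre_solution id_list report k) := by unfold Pre_solution; infer_instance

def pvWitness_solution : List String × List String × Int :=
  (["muzi", "frodo", "apeach", "neo"],
   ["muzi frodo", "apeach frodo", "frodo neo", "muzi neo", "apeach muzi"], 2)

def Spec_solution (id_list : List String) (report : List String) (k : Int) (out : List Int) : Prop := out = solution_alt id_list report k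
instance (id_list : List String) (report : List String) (k : Int) (out : List Int) : Decidable (Spec_solution id_list report k out) := by unfold Spec_solution; infer_instance

-- ===== CLAIM (what is proved, stated in full; the proofs are below) =====
def Claim_equal_solution : Prop := ∀ (id_list : List String) (report : List String) (k : Int), Dom_solution id_list report k → Pre_solution id_list report k → Spec_solution id_list report k (solution id_list report k)

-- ===== LEMMAS AND PROOFS =====

-- B's dedup loop is the fold of PySem.Set.add over the split pairs
def solution_pairs (report : List String) : PySem.Set (String × String) :=
  report.foldl (fun s e =>
    match PySem.Str.split? e " " with
    | some [reporter, reportee] => PySem.Set.add s (reporter, reportee)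
    | _ => s)
    []

theorem uniq_eq_pairs (report : List String) :
    solution_alt_uniq report = solution_pairs report := by
  unfold solution_alt_uniq solution_pairs
  refine congrFun (congrFun (congrArg _ ?_) _) _
  funext u e
  cases hsp : PySem.Str.split? e " " with
  | none => rfl
  | some l =>
    match l with
    | [] => rfl
    | [_] => rfl
    | (_ :: _ :: _ :: _) => rfl
    | [a, b] => simp [PySem.Set.add_eq_ite]

-- invariant tying A's two dictionaries to B's deduplicated pair list
structure PairRel (r1 r2 : PySem.Dict String (PySem.Set String))
    (s : PySem.Set (String × String)) : Prop where
  h1  : ∀ a b, b ∈ r1.getD a [] ↔ (a, b) ∈ s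
  h1n : ∀ a, (r1.getD a []).Nodup
  h2  : ∀ a b, a ∈ r2.getD b [] ↔ (a, b) ∈ s
  h2n : ∀ b, (r2.getD b []).Nodup
  hk  : ∀ b, b ∈ r2.keys ↔ ∃ a, (a, b) ∈ s
  hkn : r2.keys.Nodup
  sn  : s.Nodup

theorem pairRel_empty : PairRel PySem.Dict.empty PySem.Dict.empty [] := by
  constructor <;> simp [PySem.Dict.getD_empty, PySem.Dict.keys_empty]

theorem pairRel_fold (report : List String)
    (r1 r2 : PySem.Dict String (PySem.Set String)) (s : PySem.Set (String × String))
    (h : PairRel r1 r2 s) :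
    PairRel
      (report.foldl (fun st e =>
        match PySem.Str.split? e " " with
        | some [reporter, reportee] =>
            (st.1.insert reporter (PySem.Set.add (st.1.getD reporter []) reportee),
             st.2.insert reportee (PySem.Set.add (st.2.getD reportee []) reporter))
        | _ => st) (r1, r2)).1
      (report.foldl (fun st e =>
        match PySem.Str.split? e " " with
        | some [reporter, reportee] =>
            (st.1.insert reporter (PySem.Set.add (st.1.getD reporter []) reportee),
             st.2.insert reportee (PySem.Set.add (st.2.getD reportee []) reporter))
        | _ => st) (r1, r2)).2
      (report.foldl (fun s e =>
        match PySem.Str.split? e " " with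
        | some [reporter, reportee] => PySem.Set.add s (reporter, reportee)
        | _ => s) s) := by
  induction report generalizing r1 r2 s with
  | nil => exact h
  | cons e rest ih =>
    simp only [List.foldl_cons]
    cases hsp : PySem.Str.split? e " " with
    | none => exact ih r1 r2 s h
    | some l =>
      match l with
      | [] => exact ih r1 r2 s h
      | [_] => exact ih r1 r2 s h
      | (_ :: _ :: _ :: _) => exact ih r1 r2 s h
      | [a, b] =>
        apply ih
        obtain ⟨h1, h1n, h2, h2n, hk, hkn, sn⟩ := h
        constructor
        · intro a' b'
          rw [PySem.Dict.getD_insert]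
          by_cases ha : a' = a
          · subst ha
            simp [PySem.Set.mem_add, h1, Prod.ext_iff]
          · simp [PySem.Set.mem_add, h1, Prod.ext_iff, ha]
        · intro a'
          rw [PySem.Dict.getD_insert]
          split
          · exact PySem.Set.nodup_add _ _ (h1n a)
          · exact h1n a'
        · intro a' b'
          rw [PySem.Dict.getD_insert]
          by_cases hb : b' = b
          · subst hb
            simp [PySem.Set.mem_add, h2, Prod.ext_iff]
          · simp [PySem.Set.mem_add, h2, Prod.ext_iff, hb]
        · intro b'
          rw [PySem.Dict.getD_insert]
          split
          · exact PySem.Set.nodup_add _ _ (h2n b)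
          · exact h2n b'
        · intro b'
          rw [PySem.Dict.mem_keys_insert]
          simp only [PySem.Set.mem_add, Prod.ext_iff]
          constructor
          · rintro (rfl | hm)
            · exact ⟨a, Or.inr ⟨rfl, rfl⟩⟩
            · obtain ⟨a', ha'⟩ := (hk b').mp hm
              exact ⟨a', Or.inl ha'⟩
          · rintro ⟨a', (hm | ⟨_, rfl⟩)⟩
            · exact Or.inr ((hk b').mpr ⟨a', hm⟩)
            · exact Or.inl rfl
        · exact PySem.Dict.nodup_keys_insert _ _ _ hkn
        · exact PySem.Set.nodup_add _ _ sn

-- two Nodup lists with the same members have the same length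
theorem length_eq_of_nodup_of_mem_iff {α : Type} {l1 l2 : List α}
    (h1 : l1.Nodup) (h2 : l2.Nodup) (h : ∀ x, x ∈ l1 ↔ x ∈ l2) : l1.length = l2.length :=
  ((List.perm_ext_iff_of_nodup h1 h2).mpr h).length_eq

theorem solution_pairs_rel (report : List String) :
    PairRel (solution_dicts report).1 (solution_dicts report).2 (solution_pairs report) :=
  pairRel_fold report _ _ _ pairRel_empty

-- A's per-reportee distinct-reporter count equals B's scan count over uniq
theorem reportees_len_eq (report : List String) (y : String) :
    ((solution_dicts report).2.getD y []).length
      = ((solution_pairs report).filter (fun p => p.2 == y)).length := by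
  obtain ⟨_, _, h2, h2n, _, _, sn⟩ := solution_pairs_rel report
  have hfn : ((solution_pairs report).filter (fun p => p.2 == y)).Nodup :=
    List.filter_sublist.nodup sn
  have hmn : (((solution_pairs report).filter (fun p => p.2 == y)).map Prod.fst).Nodup := by
    refine List.Nodup.map_on ?_ hfn
    rintro ⟨ax, ay⟩ ha ⟨bx, by'⟩ hb hfst
    simp only [List.mem_filter, beq_iff_eq] at ha hb
    simp only at hfst
    rw [ha.2, hb.2, hfst]
  have hmem : ∀ x, x ∈ (solution_dicts report).2.getD y []
      ↔ x ∈ ((solution_pairs report).filter (fun p => p.2 == y)).map Prod.fst := by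
    intro x
    simp only [List.mem_map, List.mem_filter, beq_iff_eq, h2]
    constructor
    · intro hm; exact ⟨(x, y), ⟨hm, rfl⟩, rfl⟩
    · rintro ⟨⟨px, py⟩, ⟨hm, rfl⟩, rfl⟩; exact hm
  rw [length_eq_of_nodup_of_mem_iff (h2n y) hmn hmem, List.length_map]

-- membership in the blocked set A builds from reportees.items
theorem mem_blocksA (report : List String) (k : Int) (y : String) :
    (y ∈ ((solution_dicts report).2.items.foldl
        (fun bl p => if k ≤ (p.2.length : Int) then PySem.Set.add bl p.1 else bl) []))
      ↔ (y ∈ (solution_dicts report).2.keys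
          ∧ k ≤ (((solution_dicts report).2.getD y []).length : Int)) := by
  have hkn := (solution_pairs_rel report).hkn
  have hfold : ((solution_dicts report).2.items.foldl
        (fun bl p => if k ≤ (p.2.length : Int) then PySem.Set.add bl p.1 else bl) [])
      = PySem.Set.ofList
          (((solution_dicts report).2.items.filter
            (fun p => decide (k ≤ (p.2.length : Int)))).map Prod.fst) := by
    rw [PySem.List.foldl_ite_eq_foldl_filter (p := fun (p : String × PySem.Set String) => k ≤ (p.2.length : Int))
        (f := fun (bl : PySem.Set String) (p : String × PySem.Set String) => PySem.Set.add bl p.1),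
      ← PySem.Set.update_map_eq_foldl_add _ Prod.fst, PySem.Set.update_nil_left]
  rw [hfold, PySem.Set.mem_ofList]
  simp only [List.mem_map, List.mem_filter, decide_eq_true_eq]
  constructor
  · rintro ⟨⟨py, pu⟩, ⟨hm, hlen⟩, rfl⟩
    refine ⟨PySem.Dict.mem_keys_of_mem_items _ hm, ?_⟩
    rw [PySem.Dict.getD_of_mem_items _ hm hkn []]
    exact hlen
  · rintro ⟨hky, hlen⟩
    have hc : (solution_dicts report).2.contains y = true :=
      (PySem.Dict.contains_iff_mem_keys _ _).mpr hky
    rw [PySem.Dict.contains_eq_isSome_get?] at hc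
    obtain ⟨u, hu⟩ := Option.isSome_iff_exists.mp hc
    have hit := PySem.Dict.mem_items_of_get?_eq_some _ hu
    have hg : (solution_dicts report).2.getD y [] = u :=
      PySem.Dict.getD_of_mem_items _ hit hkn []
    exact ⟨(y, u), ⟨hit, by rw [← hg]; exact hlen⟩, rfl⟩

-- A's blocked set is duplicate-free
theorem blocksA_nodup (report : List String) (k : Int) :
    ((solution_dicts report).2.items.foldl
        (fun bl p => if k ≤ (p.2.length : Int) then PySem.Set.add bl p.1 else bl) []).Nodup := by
  rw [PySem.List.foldl_ite_eq_foldl_filter (p := fun (p : String × PySem.Set String) => k ≤ (p.2.length : Int))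
      (f := fun (bl : PySem.Set String) (p : String × PySem.Set String) => PySem.Set.add bl p.1),
    ← PySem.Set.update_map_eq_foldl_add _ Prod.fst, PySem.Set.update_nil_left]
  exact PySem.Set.nodup_ofList _

-- for a reportee that occurs in the pairs, B's 'blocked' scan decides membership in A's blocked set
theorem blocked_iff (report : List String) (k : Int) (y : String)
    (hy : ∃ a, (a, y) ∈ solution_pairs report) :
    (solution_alt_blocked (solution_pairs report) k y = true)
      ↔ (y ∈ ((solution_dicts report).2.items.foldl
          (fun bl p => if k ≤ (p.2.length : Int) then PySem.Set.add bl p.1 else bl) [])) := by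
  rw [mem_blocksA]
  have hky : y ∈ (solution_dicts report).2.keys := ((solution_pairs_rel report).hk y).mpr hy
  unfold solution_alt_blocked
  rw [reportees_len_eq]
  simp [hky]

-- the per-id value: A's intersection size equals B's brute-force filtered count
theorem per_id_eq (report : List String) (k : Int) (id : String) :
    (((PySem.Set.inter
        ((solution_dicts report).2.items.foldl
          (fun bl p => if k ≤ (p.2.length : Int) then PySem.Set.add bl p.1 else bl) [])
        ((solution_dicts report).1.getD id [])).length : Int))
      = (((solution_pairs report).filter
          (fun p => p.1 == id && solution_alt_blocked (solution_pairs report) k p.2)).length : Int) := by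
  obtain ⟨h1, h1n, _, _, _, _, sn⟩ := solution_pairs_rel report
  set blA := ((solution_dicts report).2.items.foldl
    (fun bl p => if k ≤ (p.2.length : Int) then PySem.Set.add bl p.1 else bl) []) with hblA
  set L := ((solution_pairs report).filter
    (fun p => p.1 == id && solution_alt_blocked (solution_pairs report) k p.2)) with hL
  have hLn : L.Nodup := List.filter_sublist.nodup sn
  have hmn : (L.map Prod.snd).Nodup := by
    refine List.Nodup.map_on ?_ hLn
    rintro ⟨ax, ay⟩ ha ⟨bx, by'⟩ hb hsnd
    simp only [hL, List.mem_filter, Bool.and_eq_true, beq_iff_eq] at ha hb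
    simp only at hsnd
    simp only [Prod.mk.injEq]
    exact ⟨ha.2.1.trans hb.2.1.symm, hsnd⟩
  have hlen : (PySem.Set.inter blA ((solution_dicts report).1.getD id [])).length
      = (L.map Prod.snd).length := by
    refine length_eq_of_nodup_of_mem_iff ?_ hmn ?_
    · exact PySem.Set.nodup_inter _ _ (blocksA_nodup report k)
    · intro y
      rw [PySem.Set.mem_inter]
      simp only [hL, List.mem_map, List.mem_filter, Bool.and_eq_true, beq_iff_eq]
      rw [h1 id y]
      constructor
      · rintro ⟨hbl, hpair⟩
        have hb : solution_alt_blocked (solution_pairs report) k y = true :=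
          (blocked_iff report k y ⟨id, hpair⟩).mpr hbl
        exact ⟨(id, y), ⟨hpair, rfl, hb⟩, rfl⟩
      · rintro ⟨⟨px, py⟩, ⟨hpair, hfst, hb⟩, rfl⟩
        subst hfst
        exact ⟨(blocked_iff report k py ⟨px, hpair⟩).mp hb, hpair⟩
  rw [hlen, List.length_map]

-- ===== VERDICT (by name: the statement is the Claim_ definition above) =====
theorem solution_spec : Claim_equal_solution := by
  intro id_list report k _ _
  unfold Spec_solution solution solution_alt
  simp only [uniq_eq_pairs]
  rw [PySem.List.foldl_append_singleton_eq_map, List.nil_append]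
  refine List.map_congr_left ?_
  intro id _
  exact per_id_eq report k id
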